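-- pv_equiv track=rewrite | github.com/NowhereArchive/Gateway | rename_audio.py | build_attire_map
-- ===== SOURCE A (Python) =====
-- def strip_prefix(filename):
--     return filename[5:] if filename.startswith("File:") else filename
--
-- def build_attire_map(old_data, new_data):
--     """
--     Match old attire keys -> new attire keys by filename overlap.
--     Returns {old_attire: new_attire}.
--     Only includes pairs where something actually changed.
--     """
--     attire_map = {}
--     used_old = set()
--
--     for new_attire in new_data:
--         new_files = {
--             strip_prefix(l["filename"])
--             for l in new_data[new_attire]
--             if l.get("filename")
--         }
--
--         best_old, best_score = None, 0
--         for old_attire in old_data: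
--             if old_attire in used_old:
--                 continue
--             old_files = {
--                 strip_prefix(l["filename"])
--                 for l in old_data[old_attire]
--                 if l.get("filename")
--             }
--             score = len(new_files & old_files)
--             if score > best_score:
--                 best_old, best_score = old_attire, score
--
--         if best_old and best_score > 0:
--             attire_map[best_old] = new_attire
--             used_old.add(best_old)
--
--     # Only keep pairs where the name actually changed
--     return {old: new for old, new in attire_map.items() if old != new}
-- ===== SOURCE B (Python) =====
-- def strip_prefix(filename):
--     return filename[5:] if filename.startswith("File:") else filename
--
--
-- def _files(layers):
--     return {strip_prefix(l["filename"]) for l in layers if l.get("filename")}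
--
--
-- def build_attire_map(old_data, new_data):
--     """
--     Match old attire keys -> new attire keys by filename overlap.
--     Same greedy matching as before, but driven by an inverted index
--     filename -> old attires (built once), so old file sets are never rebuilt
--     and only old attires actually sharing a file are ever scored.
--     """
--     index = {}  # old_attire -> position in old_data
--     inv = {}    # filename -> [old attires containing it, in old_data order]
--     for i, (old_attire, layers) in enumerate(old_data.items()):
--         index[old_attire] = i
--         for f in _files(layers):
--             inv.setdefault(f, []).append(old_attire)
--
--     used = set()
--     result = {}
--     for new_attire, layers in new_data.items():
--         cands = [o for f in _files(layers) for o in inv.get(f, ()) if o not in used]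
--         scores = {}
--         for o in cands:
--             scores[o] = scores.get(o, 0) + 1
--         if scores:
--             best_score = max(scores.values())
--             best_old = min((o for o in scores if scores[o] == best_score),
--                            key=lambda o: index[o])
--             if best_old:
--                 result[best_old] = new_attire
--                 used.add(best_old)
--
--     return {old: new for old, new in result.items() if old != new}
-- ===== Notes on version B (the rewrite author's own statement) =====
-- stated objective: faster
-- what changed: B builds an inverted index filename -> old attires (plus a position index) once, then scores each new attire by counting hits of its files in that index and taking the max-count/min-position candidate, instead of A rebuilding every old file set and intersecting it for every new attire.
import Mathlib
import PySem

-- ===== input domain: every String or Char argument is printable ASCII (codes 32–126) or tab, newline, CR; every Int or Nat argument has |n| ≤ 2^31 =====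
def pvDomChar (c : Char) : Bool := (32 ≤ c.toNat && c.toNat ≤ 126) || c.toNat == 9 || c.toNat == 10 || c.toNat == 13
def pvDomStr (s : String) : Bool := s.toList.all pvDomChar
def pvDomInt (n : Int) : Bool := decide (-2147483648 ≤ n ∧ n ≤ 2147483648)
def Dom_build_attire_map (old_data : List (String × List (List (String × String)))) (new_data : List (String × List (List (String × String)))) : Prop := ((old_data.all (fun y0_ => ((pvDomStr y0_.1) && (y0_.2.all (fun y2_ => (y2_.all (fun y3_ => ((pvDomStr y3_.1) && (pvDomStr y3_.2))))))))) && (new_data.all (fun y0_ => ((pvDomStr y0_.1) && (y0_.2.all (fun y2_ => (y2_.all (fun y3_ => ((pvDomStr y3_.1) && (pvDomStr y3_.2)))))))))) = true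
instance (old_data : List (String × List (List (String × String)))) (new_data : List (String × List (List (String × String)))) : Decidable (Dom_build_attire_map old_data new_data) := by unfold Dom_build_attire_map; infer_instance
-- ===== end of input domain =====

-- B is the same greedy matching driven by an inverted index filename -> old attires built once,
-- instead of rebuilding every old file set for every new attire; return value only (no mutation).

-- ===== PORT A =====
-- strip_prefix
def pvStrip (f : String) : String :=
  if PySem.Str.startswith f "File:" then PySem.Str.slice f (some 5) none else f

-- the set comprehension { strip_prefix(l["filename"]) for l in layers if l.get("filename") }
-- (shared by both Pythons; the parameter dicts are modelled by PySem.Dict.ofList = Python's dict(pairs))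
def pvFiles (layers : List (List (String × String))) : PySem.Set String :=
  layers.foldl (fun s l =>
    match (PySem.Dict.ofList l).get? "filename" with
    | some f => if f = "" then s else PySem.Set.add s (pvStrip f)
    | none => s) PySem.Set.empty

-- score = len(new_files & old_files)
def pvScore (nf : PySem.Set String) (layers : List (List (String × String))) : Int :=
  PySem.Set.len (PySem.Set.inter nf (pvFiles layers))

-- the final comprehension {old: new for old, new in m.items() if old != new} (identical line in both Pythons)
def pvFinish (m : PySem.Dict String String) : List (String × String) :=
  (m.items.foldl (fun (d : PySem.Dict String String) q =>
    if q.1 ≠ q.2 then d.insert q.1 q.2 else d) PySem.Dict.empty).items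

-- A's inner loop over old_data finding (best_old, best_score)
def pvBestA (old : List (String × List (List (String × String)))) (used : PySem.Set String)
    (nf : PySem.Set String) : Option String × Int :=
  old.foldl (fun b q =>
    if PySem.Set.contains used q.1 then b
    else
      let score := pvScore nf q.2
      if b.2 < score then (some q.1, score) else b) (none, 0)

-- A's body of 'for new_attire in new_data'
def pvStepA (old : List (String × List (List (String × String))))
    (st : PySem.Dict String String × PySem.Set String)
    (p : String × List (List (String × String))) :
    PySem.Dict String String × PySem.Set String :=
  let best := pvBestA old st.2 (pvFiles p.2)
  match best.1 with
  | some bo => if bo ≠ "" ∧ 0 < best.2 then (st.1.insert bo p.1, PySem.Set.add st.2 bo) else st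
  | none => st

def build_attire_map (old_data : List (String × List (List (String × String)))) (new_data : List (String × List (List (String × String)))) : List (String × String) :=
  let fin := (PySem.Dict.ofList new_data).items.foldl
    (pvStepA (PySem.Dict.ofList old_data).items) (PySem.Dict.empty, PySem.Set.empty)
  pvFinish fin.1

-- ===== PORT B =====
-- index = {old_attire: i}, inv = {filename: [old attires containing it]}, built in one enumerate pass
def pvIndexInv (old : List (String × List (List (String × String)))) :
    PySem.Dict String Int × PySem.Dict String (List String) :=
  (PySem.List.enumerate old).foldl
    (fun st ip =>
      (st.1.insert ip.2.1 ip.1,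
       (pvFiles ip.2.2).foldl (fun inv f => inv.modify f [] (· ++ [ip.2.1])) st.2))
    (PySem.Dict.empty, PySem.Dict.empty)

-- B's body of 'for new_attire, layers in new_data.items()'
def pvStepB (index : PySem.Dict String Int) (inv : PySem.Dict String (List String))
    (st : PySem.Dict String String × PySem.Set String)
    (p : String × List (List (String × String))) :
    PySem.Dict String String × PySem.Set String :=
  let cands := (pvFiles p.2).flatMap (fun f =>
    (inv.getD f []).filter (fun o => !(PySem.Set.contains st.2 o)))
  let scores := cands.foldl (fun d o => d.insert o (d.getD o 0 + 1)) (PySem.Dict.empty : PySem.Dict String Int)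
  match PySem.List.max? scores.values (fun v => v) with
  | none => st
  | some best_score =>
    let best_old := PySem.List.minD (scores.keys.filter (fun o => scores.getD o 0 == best_score))
      (fun o => index.getD o 0) ""
    if best_old ≠ "" then (st.1.insert best_old p.1, PySem.Set.add st.2 best_old) else st

def build_attire_map_alt (old_data : List (String × List (List (String × String)))) (new_data : List (String × List (List (String × String)))) : List (String × String) :=
  let pre := pvIndexInv (PySem.Dict.ofList old_data).items
  let fin := (PySem.Dict.ofList new_data).items.foldl
    (pvStepB pre.1 pre.2) (PySem.Dict.empty, PySem.Set.empty)
  pvFinish fin.1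

-- ===== PRECONDITION & SPEC =====
def Spec_build_attire_map (old_data : List (String × List (List (String × String)))) (new_data : List (String × List (List (String × String)))) (out : List (String × String)) : Prop := out = build_attire_map_alt old_data new_data
instance (old_data : List (String × List (List (String × String)))) (new_data : List (String × List (List (String × String)))) (out : List (String × String)) : Decidable (Spec_build_attire_map old_data new_data out) := by unfold Spec_build_attire_map; infer_instance

-- ===== CLAIM (what is proved, stated in full; the proofs are below) =====
def Claim_equal_build_attire_map : Prop := ∀ (old_data : List (String × List (List (String × String)))) (new_data : List (String × List (List (String × String)))), Dom_build_attire_map old_data new_data → Spec_build_attire_map old_data new_data (build_attire_map old_data new_data)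

-- ===== LEMMAS AND PROOFS =====

-- two entries of a key-Nodup list with the same key are the same entry
theorem pv_entry_unique {β : Type} {old : List (String × β)} (hk : (old.map (·.1)).Nodup)
    {q r : String × β} (hq : q ∈ old) (hr : r ∈ old) (h : q.1 = r.1) : q = r := by
  obtain ⟨i, hi, hqi⟩ := List.mem_iff_getElem.mp hq
  obtain ⟨j, hj, hrj⟩ := List.mem_iff_getElem.mp hr
  have hi' : i < (old.map (·.1)).length := by simpa
  have hj' : j < (old.map (·.1)).length := by simpa
  have heq : (old.map (·.1))[i]'hi' = (old.map (·.1))[j]'hj' := by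
    simp only [List.getElem_map, hqi, hrj, h]
  have hij : i = j := (hk.getElem_inj_iff).mp heq
  subst hij; rw [← hqi, ← hrj]

theorem pv_nodup_pvFiles_aux (ls : List (List (String × String))) (s : PySem.Set String)
    (hs : s.Nodup) :
    (ls.foldl (fun s l =>
      match (PySem.Dict.ofList l).get? "filename" with
      | some f => if f = "" then s else PySem.Set.add s (pvStrip f)
      | none => s) s).Nodup := by
  induction ls generalizing s with
  | nil => exact hs
  | cons l t ih =>
    rw [List.foldl_cons]
    apply ih
    cases hget : (PySem.Dict.ofList l).get? "filename" with
    | none => simpa [hget]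
    | some f =>
      by_cases hf : f = ""
      · simpa [hget, hf]
      · simpa [hget, hf] using PySem.Set.nodup_add s (pvStrip f) hs

theorem pv_nodup_pvFiles (layers : List (List (String × String))) : (pvFiles layers).Nodup :=
  pv_nodup_pvFiles_aux layers PySem.Set.empty List.nodup_nil

theorem pv_score_eq_countP (nf : PySem.Set String) (ls : List (List (String × String))) :
    pvScore nf ls = ((nf.countP (fun f => PySem.Set.contains (pvFiles ls) f) : Nat) : Int) := by
  simp [pvScore, PySem.Set.len, PySem.Set.inter, ← List.countP_eq_length_filter]

theorem pv_indexInv_append (l : List (String × List (List (String × String))))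
    (q : String × List (List (String × String))) :
    pvIndexInv (l ++ [q]) =
      ((pvIndexInv l).1.insert q.1 (l.length : Int),
       (pvFiles q.2).foldl (fun inv f => inv.modify f [] (· ++ [q.1])) (pvIndexInv l).2) := by
  unfold pvIndexInv
  rw [PySem.List.enumerate_append, List.foldl_append]
  simp [PySem.List.enumerate]

theorem pv_index_getD (old : List (String × List (List (String × String))))
    (hk : (old.map (·.1)).Nodup) (j : Nat) (hj : j < old.length) :
    (pvIndexInv old).1.getD (old[j].1) 0 = (j : Int) := by
  induction old using List.reverseRecOn with
  | nil => simp at hj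
  | append_singleton l q ih =>
    rw [List.map_append, List.nodup_append] at hk
    obtain ⟨hkl, -, hdisj⟩ := hk
    rw [pv_indexInv_append]
    simp only [List.length_append, List.length_cons, List.length_nil] at hj
    by_cases hlt : j < l.length
    · have hmem : (l ++ [q])[j].1 ∈ l.map (·.1) := by
        rw [List.getElem_append_left hlt]
        exact List.mem_map_of_mem (l.getElem_mem hlt)
      have hne : (l ++ [q])[j].1 ≠ q.1 := by
        intro h
        exact (hdisj _ hmem q.1 (by simp) ) h
      rw [PySem.Dict.getD_insert, if_neg hne, List.getElem_append_left hlt]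
      exact ih hkl hlt
    · have hj' : j = l.length := by omega
      subst hj'
      rw [List.getElem_concat_length rfl, PySem.Dict.getD_insert, if_pos rfl]

theorem pv_modify_append_const (fs : List String) (o : String)
    (d : PySem.Dict String (List String)) (f : String) :
    (fs.foldl (fun inv x => inv.modify x [] (· ++ [o])) d).getD f [] =
      d.getD f [] ++ List.replicate (fs.count f) o := by
  induction fs generalizing d with
  | nil => simp
  | cons x t ih =>
    rw [List.foldl_cons, ih, PySem.Dict.getD_modify]
    by_cases h : f = x
    · subst h
      simp [List.replicate_succ]
    · have : (x == f) = false := by simpa using fun h' => h h'.symm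
      simp [List.count_cons, this, h]

theorem pv_inv_getD (old : List (String × List (List (String × String)))) (f : String) :
    (pvIndexInv old).2.getD f [] =
      (old.filter (fun q => PySem.Set.contains (pvFiles q.2) f)).map (·.1) := by
  induction old using List.reverseRecOn with
  | nil => simp [pvIndexInv, PySem.List.enumerate]
  | append_singleton l q ih =>
    rw [pv_indexInv_append]
    simp only [List.filter_append, List.map_append]
    rw [pv_modify_append_const, ih]
    congr 1
    by_cases h : f ∈ pvFiles q.2
    · rw [List.count_eq_one_of_mem (pv_nodup_pvFiles q.2) h]
      simp [h]
    · rw [List.count_eq_zero_of_not_mem h]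
      simp [h]

theorem pv_bestA_char (old : List (String × List (List (String × String))))
    (used : PySem.Set String) (nf : PySem.Set String) :
    (pvBestA old used nf = (none, 0) ∧
      ∀ q ∈ old, PySem.Set.contains used q.1 = false → pvScore nf q.2 ≤ 0) ∨
    (∃ i, ∃ hi : i < old.length,
      pvBestA old used nf = (some old[i].1, pvScore nf old[i].2) ∧
      PySem.Set.contains used old[i].1 = false ∧ 1 ≤ pvScore nf old[i].2 ∧
      (∀ j, ∀ hj : j < old.length, PySem.Set.contains used old[j].1 = false →
        pvScore nf old[j].2 ≤ pvScore nf old[i].2) ∧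
      (∀ j, ∀ hj : j < old.length, j < i → PySem.Set.contains used old[j].1 = false →
        pvScore nf old[j].2 < pvScore nf old[i].2)) := by
  induction old using List.reverseRecOn with
  | nil =>
    left
    refine ⟨rfl, ?_⟩
    intro q hq; simp at hq
  | append_singleton l q ih =>
    have happ : pvBestA (l ++ [q]) used nf =
        (if PySem.Set.contains used q.1 then pvBestA l used nf
         else if (pvBestA l used nf).2 < pvScore nf q.2 then (some q.1, pvScore nf q.2)
         else pvBestA l used nf) := by
      simp [pvBestA, List.foldl_append]
    rcases ih with ⟨hb, hall⟩ | ⟨i, hi, hb, hui, hsi, hmax, hmin⟩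
    · by_cases hu : PySem.Set.contains used q.1
      · left
        refine ⟨by rw [happ, if_pos hu, hb], ?_⟩
        intro r hr hru
        rcases List.mem_append.mp hr with h | h
        · exact hall r h hru
        · have : r = q := by simpa using h
          rw [this] at hru; rw [hru] at hu; exact absurd hu (by simp)
      · have hu' : PySem.Set.contains used q.1 = false := by simpa using hu
        by_cases hs : (0:Int) < pvScore nf q.2
        · right
          refine ⟨l.length, by simp, ?_, ?_, ?_, ?_, ?_⟩
          · rw [happ, if_neg hu, hb]
            simp [hs, List.getElem_concat_length rfl]
          · rw [List.getElem_concat_length rfl]; exact hu'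
          · rw [List.getElem_concat_length rfl]; omega
          · intro j hj hju
            rw [List.getElem_concat_length rfl]
            by_cases hlt : j < l.length
            · rw [List.getElem_append_left hlt] at hju ⊢
              have := hall l[j] (l.getElem_mem hlt) hju
              omega
            · have : j = l.length := by simp at hj; omega
              subst this
              rw [List.getElem_concat_length rfl]
          · intro j hj hji hju
            have hlt : j < l.length := hji
            rw [List.getElem_append_left hlt] at hju ⊢
            rw [List.getElem_concat_length rfl]
            have := hall l[j] (l.getElem_mem hlt) hju
            omega
        · left
          refine ⟨by rw [happ, if_neg hu, hb]; simp; omega, ?_⟩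
          intro r hr hru
          rcases List.mem_append.mp hr with h | h
          · exact hall r h hru
          · have : r = q := by simpa using h
            subst this; omega
    · have hgi : (l ++ [q])[i]'(by simp; omega) = l[i] := List.getElem_append_left hi
      by_cases hu : PySem.Set.contains used q.1
      · right
        refine ⟨i, by simp; omega, ?_, ?_, ?_, ?_, ?_⟩
        · rw [happ, if_pos hu, hb, hgi]
        · rw [hgi]; exact hui
        · rw [hgi]; exact hsi
        · intro j hj hju
          rw [hgi]
          by_cases hlt : j < l.length
          · rw [List.getElem_append_left hlt] at hju ⊢
            exact hmax j hlt hju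
          · have : j = l.length := by simp at hj; omega
            subst this
            rw [List.getElem_concat_length rfl] at hju
            rw [hju] at hu; exact absurd hu (by simp)
        · intro j hj hji hju
          have hlt : j < l.length := by omega
          rw [List.getElem_append_left hlt] at hju ⊢
          rw [hgi]
          exact hmin j hlt hji hju
      · have hu' : PySem.Set.contains used q.1 = false := by simpa using hu
        by_cases hs : pvScore nf l[i].2 < pvScore nf q.2
        · right
          refine ⟨l.length, by simp, ?_, ?_, ?_, ?_, ?_⟩
          · rw [happ, if_neg hu, hb]
            simp [hs, List.getElem_concat_length rfl]
          · rw [List.getElem_concat_length rfl]; exact hu'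
          · rw [List.getElem_concat_length rfl]; omega
          · intro j hj hju
            rw [List.getElem_concat_length rfl]
            by_cases hlt : j < l.length
            · rw [List.getElem_append_left hlt] at hju ⊢
              have := hmax j hlt hju
              omega
            · have : j = l.length := by simp at hj; omega
              subst this
              rw [List.getElem_concat_length rfl]
          · intro j hj hji hju
            have hlt : j < l.length := hji
            rw [List.getElem_append_left hlt] at hju ⊢
            rw [List.getElem_concat_length rfl]
            have := hmax j hlt hju
            omega
        · right
          refine ⟨i, by simp; omega, ?_, ?_, ?_, ?_, ?_⟩
          · rw [happ, if_neg hu, hb, hgi]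
            simp; omega
          · rw [hgi]; exact hui
          · rw [hgi]; exact hsi
          · intro j hj hju
            rw [hgi]
            by_cases hlt : j < l.length
            · rw [List.getElem_append_left hlt] at hju ⊢
              exact hmax j hlt hju
            · have : j = l.length := by simp at hj; omega
              subst this
              rw [List.getElem_concat_length rfl] at hju ⊢
              omega
          · intro j hj hji hju
            have hlt : j < l.length := by omega
            rw [List.getElem_append_left hlt] at hju ⊢
            rw [hgi]
            exact hmin j hlt hji hju

-- the candidate list B draws from the inverted index, in mathematical form
def pvC (old : List (String × List (List (String × String)))) (used : PySem.Set String)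
    (nf : PySem.Set String) : List String :=
  nf.flatMap (fun f =>
    ((old.filter (fun q => PySem.Set.contains (pvFiles q.2) f)).map (·.1)).filter
      (fun x => !(PySem.Set.contains used x)))

theorem pv_not_mem_of_contains_false {s : PySem.Set String} {x : String}
    (h : PySem.Set.contains s x = false) : x ∉ s := fun hm => by
  rw [(PySem.Set.contains_iff s x).mpr hm] at h; cases h

theorem pv_sum_ite (l : List String) (P : String → Bool) :
    (l.map (fun f => if P f then 1 else 0)).sum = l.countP P := by
  induction l with
  | nil => rfl
  | cons x t ih => by_cases h : P x <;> simp [h, ih, Nat.add_comm]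

theorem pv_mem_cands (old : List (String × List (List (String × String))))
    (used nf : PySem.Set String) (o : String) :
    o ∈ pvC old used nf ↔
      PySem.Set.contains used o = false ∧ ∃ r ∈ old, r.1 = o ∧ 1 ≤ pvScore nf r.2 := by
  unfold pvC
  constructor
  · intro h
    obtain ⟨f, hf, hin⟩ := List.mem_flatMap.mp h
    obtain ⟨hmem, hpsi⟩ := List.mem_filter.mp hin
    obtain ⟨r, hr, hro⟩ := List.mem_map.mp hmem
    obtain ⟨hrold, hrf⟩ := List.mem_filter.mp hr
    have hu : PySem.Set.contains used o = false := by
      cases hcu : PySem.Set.contains used o with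
      | false => rfl
      | true => rw [hcu] at hpsi; simp at hpsi
    refine ⟨hu, r, hrold, hro, ?_⟩
    rw [pv_score_eq_countP]
    have : 0 < nf.countP (fun f => PySem.Set.contains (pvFiles r.2) f) :=
      List.countP_pos_iff.mpr ⟨f, hf, hrf⟩
    omega
  · rintro ⟨hu, r, hr, rfl, hs⟩
    rw [pv_score_eq_countP] at hs
    have : 0 < nf.countP (fun f => PySem.Set.contains (pvFiles r.2) f) := by omega
    obtain ⟨f, hf, hrf⟩ := List.countP_pos_iff.mp this
    refine List.mem_flatMap.mpr ⟨f, hf, ?_⟩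
    refine List.mem_filter.mpr ⟨?_, by simp [pv_not_mem_of_contains_false hu]⟩
    exact List.mem_map.mpr ⟨r, List.mem_filter.mpr ⟨hr, hrf⟩, rfl⟩

theorem pv_count_cands (old : List (String × List (List (String × String))))
    (hk : (old.map (·.1)).Nodup) (used nf : PySem.Set String)
    (r : String × List (List (String × String))) (hr : r ∈ old)
    (hu : PySem.Set.contains used r.1 = false) :
    (((pvC old used nf).count r.1 : Nat) : Int) = pvScore nf r.2 := by
  unfold pvC
  rw [List.count_flatMap]
  have hinner : ∀ f : String,
      (((old.filter (fun q => PySem.Set.contains (pvFiles q.2) f)).map (·.1)).filter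
        (fun x => !(PySem.Set.contains used x))).count r.1 =
      if PySem.Set.contains (pvFiles r.2) f then 1 else 0 := by
    intro f
    rw [List.count_filter (by simp [pv_not_mem_of_contains_false hu])]
    have hsub : ((old.filter (fun q => PySem.Set.contains (pvFiles q.2) f)).map (·.1)).Sublist
        (old.map (·.1)) := List.Sublist.map _ List.filter_sublist
    have hnd := hsub.nodup hk
    by_cases hmem : r.1 ∈ (old.filter (fun q => PySem.Set.contains (pvFiles q.2) f)).map (·.1)
    · obtain ⟨r', hr', hr'1⟩ := List.mem_map.mp hmem
      obtain ⟨hr'old, hr'f⟩ := List.mem_filter.mp hr'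
      have : r' = r := pv_entry_unique hk hr'old hr hr'1
      subst this
      rw [List.count_eq_one_of_mem hnd hmem, if_pos hr'f]
    · have hnf : PySem.Set.contains (pvFiles r.2) f ≠ true := by
        intro hc
        exact hmem (List.mem_map.mpr ⟨r, List.mem_filter.mpr ⟨hr, hc⟩, rfl⟩)
      rw [List.count_eq_zero_of_not_mem hmem, if_neg hnf]
  have h1 : List.map (List.count r.1 ∘ fun f =>
        ((old.filter (fun q => PySem.Set.contains (pvFiles q.2) f)).map (·.1)).filter
          (fun x => !(PySem.Set.contains used x))) nf =
      nf.map (fun f => if PySem.Set.contains (pvFiles r.2) f then 1 else 0) :=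
    List.map_congr_left (fun f _ => hinner f)
  rw [h1, pv_sum_ite, ← pv_score_eq_countP]

theorem pv_step_eq (old : List (String × List (List (String × String))))
    (hk : (old.map (·.1)).Nodup)
    (st : PySem.Dict String String × PySem.Set String)
    (p : String × List (List (String × String))) :
    pvStepA old st p = pvStepB (pvIndexInv old).1 (pvIndexInv old).2 st p := by
  have hcands : (pvFiles p.2).flatMap (fun f =>
      ((pvIndexInv old).2.getD f []).filter (fun o => !(PySem.Set.contains st.2 o))) =
      pvC old st.2 (pvFiles p.2) := by
    unfold pvC
    simp only [pv_inv_getD]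
  rcases pv_bestA_char old st.2 (pvFiles p.2) with ⟨hb, hall⟩ | ⟨i, hi, hb, hui, hsi, hmax, hmin⟩
  · have hC : pvC old st.2 (pvFiles p.2) = [] := by
      rw [List.eq_nil_iff_forall_not_mem]
      intro o ho
      obtain ⟨hu, r, hr, rfl, hs⟩ := (pv_mem_cands _ _ _ _).mp ho
      have := hall r hr hu
      omega
    simp only [pvStepA, pvStepB]
    rw [hb, hcands, hC]
    rfl
  · simp only [pvStepA, pvStepB]
    rw [hb, hcands, PySem.Dict.foldl_insert_getD_add_one_eq_counter]
    set C := pvC old st.2 (pvFiles p.2) with hCdef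
    have hkmem : old[i].1 ∈ C :=
      (pv_mem_cands _ _ _ _).mpr ⟨hui, old[i], List.getElem_mem hi, rfl, hsi⟩
    have hcnt_i : ((C.count old[i].1 : Nat) : Int) = pvScore (pvFiles p.2) old[i].2 :=
      pv_count_cands old hk st.2 (pvFiles p.2) old[i] (List.getElem_mem hi) hui
    have hvals : (PySem.Dict.counter C).values =
        (PySem.Set.ofList C).map (fun x => ((C.count x : Nat) : Int)) := by
      show ((PySem.Dict.counter C).items.map (·.2)) = _
      rw [PySem.Dict.items_counter, List.map_map]
      rfl
    have hfact : ∀ o ∈ C, ∃ j : Nat, ∃ hj : j < old.length, old[j].1 = o ∧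
        PySem.Set.contains st.2 old[j].1 = false ∧
        ((C.count o : Nat) : Int) = pvScore (pvFiles p.2) old[j].2 ∧
        pvScore (pvFiles p.2) old[j].2 ≤ pvScore (pvFiles p.2) old[i].2 := by
      intro o ho
      obtain ⟨hu, r, hr, rfl, hs⟩ := (pv_mem_cands _ _ _ _).mp ho
      obtain ⟨j, hj, hjr⟩ := List.mem_iff_getElem.mp hr
      have hju : PySem.Set.contains st.2 old[j].1 = false := by rw [hjr]; exact hu
      refine ⟨j, hj, by rw [hjr], hju, ?_, hmax j hj hju⟩
      have := pv_count_cands old hk st.2 (pvFiles p.2) r hr hu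
      rw [← hjr]; rw [← hjr] at this; exact this
    obtain ⟨bs, hbs⟩ : ∃ bs, PySem.List.max? (PySem.Dict.counter C).values (fun v => v) = some bs := by
      cases h : PySem.List.max? (PySem.Dict.counter C).values (fun v => v) with
      | some bs => exact ⟨bs, rfl⟩
      | none =>
        rw [PySem.List.max?_eq_none_iff, hvals, List.map_eq_nil_iff] at h
        have := (PySem.Set.mem_ofList C old[i].1).mpr hkmem
        rw [h] at this
        simp at this
    have hbs_le : bs ≤ pvScore (pvFiles p.2) old[i].2 := by
      have hbsmem := PySem.List.max?_mem hbs
      rw [hvals] at hbsmem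
      obtain ⟨o, ho, hoeq⟩ := List.mem_map.mp hbsmem
      obtain ⟨j, hj, -, -, hcnt, hle⟩ := hfact o ((PySem.Set.mem_ofList C o).mp ho)
      rw [← hoeq, hcnt]
      exact hle
    have hs_mem : pvScore (pvFiles p.2) old[i].2 ∈ (PySem.Dict.counter C).values := by
      rw [hvals]
      exact List.mem_map.mpr ⟨old[i].1, (PySem.Set.mem_ofList _ _).mpr hkmem, hcnt_i⟩
    have hbs_eq : bs = pvScore (pvFiles p.2) old[i].2 :=
      le_antisymm hbs_le (PySem.List.max?_isMax hbs _ hs_mem)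
    simp only [hbs]
    set L := ((PySem.Dict.counter C).keys.filter
      (fun o => (PySem.Dict.counter C).getD o 0 == bs)) with hL
    have hkL : old[i].1 ∈ L := by
      rw [hL, PySem.Dict.keys_counter]
      refine List.mem_filter.mpr ⟨(PySem.Set.mem_ofList _ _).mpr hkmem, ?_⟩
      rw [PySem.Dict.getD_counter, hbs_eq]
      rw [show ((C.count old[i].1 : Nat) : Int) = pvScore (pvFiles p.2) old[i].2 from hcnt_i]
      simp
    obtain ⟨m, hm⟩ : ∃ m, PySem.List.min? L (fun o => (pvIndexInv old).1.getD o 0) = some m := by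
      cases h : PySem.List.min? L (fun o => (pvIndexInv old).1.getD o 0) with
      | some m => exact ⟨m, rfl⟩
      | none =>
        rw [PySem.List.min?_eq_none_iff] at h
        rw [h] at hkL
        simp at hkL
    have hmL := PySem.List.min?_mem hm
    have hmin_le := PySem.List.min?_isMin hm _ hkL
    rw [hL, PySem.Dict.keys_counter] at hmL
    obtain ⟨hmC, hmeq⟩ := List.mem_filter.mp hmL
    have hmC' : m ∈ C := (PySem.Set.mem_ofList _ _).mp hmC
    obtain ⟨j, hj, hjm, hju, hcnt_m, hle_m⟩ := hfact m hmC'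
    have hidx_m : (pvIndexInv old).1.getD m 0 = (j : Int) := by
      rw [← hjm]; exact pv_index_getD old hk j hj
    have hidx_k : (pvIndexInv old).1.getD old[i].1 0 = (i : Int) := pv_index_getD old hk i hi
    have hcntm_bs : ((C.count m : Nat) : Int) = bs := by
      rw [PySem.Dict.getD_counter] at hmeq
      simpa using hmeq
    have hji : j = i := by
      have hle_ji : (j : Int) ≤ (i : Int) := by
        have := hmin_le
        simp only [hidx_m, hidx_k] at this
        exact this
      by_contra hne
      have hjlt : j < i := by omega
      have hlt := hmin j hj hjlt hju
      rw [← hcnt_m, hcntm_bs, hbs_eq] at hlt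
      omega
    have hmk : m = old[i].1 := by subst hji; exact hjm.symm
    have hminD : PySem.List.minD L (fun o => (pvIndexInv old).1.getD o 0) "" = old[i].1 := by
      simp [PySem.List.minD, hm, hmk]
    rw [hminD]
    by_cases h0 : old[i].1 = ""
    · simp [h0]
    · simp [h0]
      omega

-- ===== VERDICT (by name: the statement is the Claim_ definition above) =====
theorem build_attire_map_spec : Claim_equal_build_attire_map := by
  intro old_data new_data _
  unfold Spec_build_attire_map build_attire_map build_attire_map_alt
  have hk : (((PySem.Dict.ofList old_data).items.map (·.1)).Nodup) :=
    PySem.Dict.nodup_keys_ofList old_data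
  have := List.foldl_ext (pvStepA (PySem.Dict.ofList old_data).items)
    (pvStepB (pvIndexInv (PySem.Dict.ofList old_data).items).1 (pvIndexInv (PySem.Dict.ofList old_data).items).2)
    (PySem.Dict.empty, PySem.Set.empty) (l := (PySem.Dict.ofList new_data).items)
    (fun st b _ => pv_step_eq _ hk st b)
  simp only [this]
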